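-- pv_equiv track=rewrite | github.com/shubo7996/Project-Euler | Python/euler46.py | check
-- ===== SOURCE A (Python) =====
-- def check(num_,primelist):
-- 	k=1
-- 	while(2*k*k)<num_:
-- 		p=num_-2*k*k
-- 		if p in primelist:
-- 			return True
-- 		k=k+1
-- 	return False
-- ===== SOURCE B (Python) =====
-- def _isqrt(n):
--     # Newton's method floor square root (exact for n >= 0)
--     x = n
--     y = (x + 1) // 2
--     while y < x:
--         x = y
--         y = (x + n // x) // 2
--     return x
--
-- def check(num_, primelist):
--     for p in primelist:
--         diff = num_ - p
--         if p > 0 and diff > 0 and diff % 2 == 0: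
--             m = diff // 2
--             s = _isqrt(m)
--             if s * s == m:
--                 return True
--     return False
-- ===== Notes on version B (the rewrite author's own statement) =====
-- stated objective: faster
-- what changed: Iterate over the primes instead of over k: for each p test in O(1)-ish whether (num_-p)/2 is a positive perfect square via an integer Newton sqrt, instead of scanning the whole list for membership for every k with 2k^2 < num_.
import Mathlib
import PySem

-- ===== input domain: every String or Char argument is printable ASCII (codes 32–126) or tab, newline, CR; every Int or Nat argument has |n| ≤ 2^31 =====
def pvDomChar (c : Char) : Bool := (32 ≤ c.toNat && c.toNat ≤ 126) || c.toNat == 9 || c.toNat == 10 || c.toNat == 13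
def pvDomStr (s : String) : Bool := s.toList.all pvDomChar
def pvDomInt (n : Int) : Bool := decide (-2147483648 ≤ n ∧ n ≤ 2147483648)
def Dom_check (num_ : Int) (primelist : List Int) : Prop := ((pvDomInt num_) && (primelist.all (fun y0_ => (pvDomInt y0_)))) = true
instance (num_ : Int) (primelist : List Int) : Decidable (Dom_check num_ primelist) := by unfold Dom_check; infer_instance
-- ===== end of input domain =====

-- B iterates over the primes and tests each candidate with an integer Newton square root,
-- instead of A's scan of k-values with a list-membership test per k.

-- ===== PORT A =====
-- while (2*k*k) < num_: p = num_ - 2*k*k; if p in primelist: return True; k += 1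
def checkLoop (num_ : Int) (primelist : List Int) (k : Nat) : Bool :=
  if 2 * (k : Int) * k < num_ then
    if (num_ - 2 * (k : Int) * k) ∈ primelist then true
    else checkLoop num_ primelist (k + 1)
  else false
termination_by num_.toNat - 2 * k * k
decreasing_by
  have h : 2 * (k : Int) * k < num_ := by assumption
  have h2 : ((2 * k * k : Nat) : Int) = 2 * (k : Int) * k := by push_cast; ring
  rw [← h2] at h
  have h3 : 2 * k * k < num_.toNat := by omega
  have hk : 2 * (k + 1) * (k + 1) = 2 * k * k + 4 * k + 2 := by ring
  omega

def check (num_ : Int) (primelist : List Int) : Bool :=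
  checkLoop num_ primelist 1

-- ===== PORT B =====
-- Newton's-method floor square root, transliterating _isqrt in Source B (exact for every Nat)
def isqrtGo (n x y : Nat) : Nat :=
  if y < x then isqrtGo n y ((y + n / y) / 2) else x
termination_by x

def isqrt (n : Nat) : Nat := isqrtGo n n ((n + 1) / 2)

def check_alt (num_ : Int) (primelist : List Int) : Bool :=
  primelist.any fun p =>
    let diff := num_ - p
    if 0 < p ∧ 0 < diff ∧ PySem.Int.mod diff 2 = 0 then
      let m := (PySem.Int.floordiv diff 2).toNat  -- diff > 0, so Python's diff//2 is this Nat
      isqrt m * isqrt m == m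
    else false

-- ===== PRECONDITION & SPEC =====
def Spec_check (num_ : Int) (primelist : List Int) (out : Bool) : Prop := out = check_alt num_ primelist
instance (num_ : Int) (primelist : List Int) (out : Bool) : Decidable (Spec_check num_ primelist out) := by unfold Spec_check; infer_instance

-- ===== CLAIM (what is proved, stated in full; the proofs are below) =====
def Claim_equal_check : Prop := ∀ (num_ : Int) (primelist : List Int), Dom_check num_ primelist → Spec_check num_ primelist (check num_ primelist)

-- ===== LEMMAS AND PROOFS =====

-- Newton iteration computes Nat.sqrt
theorem newton_step_ge_sqrt (n x : Nat) (hx : 1 ≤ x) : Nat.sqrt n ≤ (x + n / x) / 2 := by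
  set s := Nat.sqrt n with hs
  have hsq : s * s ≤ n := Nat.sqrt_le n
  have hdiv : s * s / x ≤ n / x := Nat.div_le_div_right hsq
  have hdm := Nat.div_add_mod (s * s) x
  have hmlt : s * s % x < x := Nat.mod_lt _ hx
  have hamgm : 2 * s * x ≤ x * x + s * s := by nlinarith [two_mul_le_add_sq x s, sq x, sq s]
  have key : 2 * s ≤ x + s * s / x := by nlinarith [hdm, hmlt, hamgm]
  have key2 : 2 * s ≤ x + n / x := le_trans key (by omega)
  omega

theorem isqrtGo_eq_sqrt (n : Nat) : ∀ x, Nat.sqrt n ≤ x → isqrtGo n x ((x + n / x) / 2) = Nat.sqrt n := by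
  intro x
  induction x using Nat.strong_induction_on with
  | _ x ih =>
    intro hs
    rw [isqrtGo]
    by_cases hlt : (x + n / x) / 2 < x
    · rw [if_pos hlt]
      have hx1 : 1 ≤ x := lt_of_le_of_lt (Nat.zero_le _) hlt
      exact ih _ hlt (newton_step_ge_sqrt n x hx1)
    · rw [if_neg hlt]
      rcases Nat.eq_zero_or_pos x with hx0 | hx1
      · omega
      · -- x ≤ (x + n/x)/2 forces x*x ≤ n, hence x ≤ sqrt n
        have h1 : x ≤ (x + n / x) / 2 := by omega
        have h2 : x * 2 ≤ x + n / x := (Nat.le_div_iff_mul_le (by omega)).1 h1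
        have h3 : x ≤ n / x := by omega
        have h4 : x * x ≤ n := (Nat.le_div_iff_mul_le hx1).1 h3
        have h5 : x ≤ Nat.sqrt n := Nat.le_sqrt.2 (by nlinarith)
        omega

theorem isqrt_eq_sqrt (n : Nat) : isqrt n = Nat.sqrt n := by
  rcases Nat.eq_zero_or_pos n with h0 | h1
  · subst h0
    rw [isqrt, isqrtGo]
    simp
  · have hdd : n / n = 1 := Nat.div_self h1
    have : isqrt n = isqrtGo n n ((n + n / n) / 2) := by rw [isqrt, hdd]
    rw [this]
    exact isqrtGo_eq_sqrt n n (Nat.sqrt_le_self n)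

-- A's loop characterised as an existential
theorem checkLoop_iff (num_ : Int) (pl : List Int) (k : Nat) :
    checkLoop num_ pl k = true ↔
      ∃ j : Nat, k ≤ j ∧ 2 * (j : Int) * j < num_ ∧ (num_ - 2 * (j : Int) * j) ∈ pl := by
  fun_induction checkLoop num_ pl k with
  | case1 k h hmem =>
    simp only [true_iff]
    exact ⟨k, le_refl k, h, hmem⟩
  | case2 k h hmem ih =>
    rw [ih]
    constructor
    · rintro ⟨j, hj, hlt, hm⟩
      exact ⟨j, by omega, hlt, hm⟩
    · rintro ⟨j, hj, hlt, hm⟩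
      refine ⟨j, ?_, hlt, hm⟩
      rcases Nat.eq_or_lt_of_le hj with rfl | hj'
      · exact absurd hm hmem
      · omega
  | case3 k h =>
    simp only [Bool.false_eq_true, false_iff]
    rintro ⟨j, hj, hlt, -⟩
    apply h
    have hjk : (k : Int) ≤ j := by exact_mod_cast hj
    have hk0 : (0 : Int) ≤ k := by positivity
    nlinarith

-- B characterised as an existential
theorem check_alt_iff (num_ : Int) (pl : List Int) :
    check_alt num_ pl = true ↔
      ∃ p ∈ pl, 0 < p ∧ 0 < num_ - p ∧ PySem.Int.mod (num_ - p) 2 = 0 ∧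
        isqrt (PySem.Int.floordiv (num_ - p) 2).toNat *
          isqrt (PySem.Int.floordiv (num_ - p) 2).toNat =
          (PySem.Int.floordiv (num_ - p) 2).toNat := by
  simp only [check_alt, List.any_eq_true]
  constructor
  · rintro ⟨p, hp, h⟩
    split at h
    · next hc =>
      refine ⟨p, hp, hc.1, hc.2.1, hc.2.2, by simpa using h⟩
    · simp at h
  · rintro ⟨p, hp, h1, h2, h3, h4⟩
    refine ⟨p, hp, ?_⟩
    rw [if_pos ⟨h1, h2, h3⟩]
    simpa using h4

theorem check_eq (num_ : Int) (pl : List Int) : check num_ pl = check_alt num_ pl := by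
  rw [Bool.eq_iff_iff, check, checkLoop_iff, check_alt_iff]
  constructor
  · rintro ⟨j, hj1, hlt, hmem⟩
    refine ⟨num_ - 2 * (j : Int) * j, hmem, by omega, ?_, ?_, ?_⟩
    · have : (1 : Int) ≤ j := by exact_mod_cast hj1
      nlinarith
    · have hd : num_ - (num_ - 2 * (j : Int) * j) = 2 * (j : Int) * j := by ring
      rw [hd, PySem.Int.mod_eq_zero_iff_dvd]
      exact ⟨(j : Int) * j, by ring⟩
    · have hd : num_ - (num_ - 2 * (j : Int) * j) = 2 * ((j : Int) * j) := by ring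
      rw [hd, PySem.Int.floordiv_eq_ediv_of_pos (by omega),
        Int.mul_ediv_cancel_left _ (by omega)]
      have hcast : ((j : Int) * j).toNat = j * j := by
        rw [← Nat.cast_mul, Int.toNat_natCast]
      rw [hcast, isqrt_eq_sqrt, Nat.sqrt_eq]
  · rintro ⟨p, hp, hp0, hd0, hmod, hsq⟩
    obtain ⟨d, hd⟩ := (PySem.Int.mod_eq_zero_iff_dvd _ _).1 hmod
    have hfd : PySem.Int.floordiv (num_ - p) 2 = d := by
      rw [hd, PySem.Int.floordiv_eq_ediv_of_pos (by omega),
        Int.mul_ediv_cancel_left _ (by omega)]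
    have hd0' : 0 < d := by omega
    have hmt : ((d.toNat : Int)) = d := Int.toNat_of_nonneg (by omega)
    set j := isqrt d.toNat with hj
    have hjj : j * j = d.toNat := by rw [hj]; rw [hfd] at hsq; exact hsq
    have hj1 : 1 ≤ j := by
      rcases Nat.eq_zero_or_pos j with h0 | h1
      · exfalso; rw [h0] at hjj; omega
      · exact h1
    refine ⟨j, hj1, ?_, ?_⟩
    · have : 2 * (j : Int) * j = num_ - p := by
        have : ((j * j : Nat) : Int) = d := by rw [hjj, hmt]
        push_cast at this
        rw [hd]; nlinarith [this]
      rw [this]; omega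
    · have : 2 * (j : Int) * j = num_ - p := by
        have : ((j * j : Nat) : Int) = d := by rw [hjj, hmt]
        push_cast at this
        rw [hd]; nlinarith [this]
      rw [this]
      simpa using hp

-- ===== VERDICT (by name: the statement is the Claim_ definition above) =====
theorem check_spec : Claim_equal_check := by
  intro num_ pl _
  unfold Spec_check
  exact check_eq num_ pl
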